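-- pv_equiv track=rewrite | github.com/burning-calamity/extirpation | online/running_key.py | running_key_encrypt
-- ===== SOURCE A (Python) =====
-- def _clean_key(key_text: str) -> str:
--     k = ''.join(ch for ch in key_text.upper() if ch.isalpha())
--     if not k:
--         raise ValueError('key_text must contain alphabetic characters')
--     return k
--
-- def running_key_encrypt(plaintext: str, key_text: str) -> str:
--     key = _clean_key(key_text)
--     out = []
--     i = 0
--     for ch in plaintext:
--         if ch.isalpha():
--             if i >= len(key):
--                 raise ValueError('key_text must be at least as long as alphabetic plaintext')
--             base = ord('A') if ch.isupper() else ord('a')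
--             p = ord(ch.upper()) - ord('A')
--             k = ord(key[i]) - ord('A')
--             out.append(chr(base + ((p + k) % 26)))
--             i += 1
--         else:
--             out.append(ch)
--     return ''.join(out)
-- ===== SOURCE B (Python) =====
-- def _clean_key(key_text: str) -> str:
--     k = ''.join(ch for ch in key_text.upper() if ch.isalpha())
--     if not k:
--         raise ValueError('key_text must contain alphabetic characters')
--     return k
--
-- def _shift(ch: str, k: str) -> str:
--     base = ord('A') if ch.isupper() else ord('a')
--     return chr(base + ((ord(ch.upper()) - ord('A') + ord(k) - ord('A')) % 26))
--
-- def running_key_encrypt(plaintext: str, key_text: str) -> str: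
--     key = _clean_key(key_text)
--     letters = [ch for ch in plaintext if ch.isalpha()]
--     if len(letters) > len(key):
--         raise ValueError('key_text must be at least as long as alphabetic plaintext')
--     enc = iter([_shift(ch, k) for ch, k in zip(letters, key)])
--     return ''.join(next(enc) if ch.isalpha() else ch for ch in plaintext)
-- ===== Notes on version B (the rewrite author's own statement) =====
-- stated objective: alternative
-- what changed: Replaces A's single interleaved loop (key-index counter, per-character branch-and-shift) with three separate passes: extract the alphabetic characters and validate the length, encrypt them by zipping with the cleaned key, then merge the encrypted letters back while re-walking the plaintext via an iterator.
import Mathlib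
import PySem

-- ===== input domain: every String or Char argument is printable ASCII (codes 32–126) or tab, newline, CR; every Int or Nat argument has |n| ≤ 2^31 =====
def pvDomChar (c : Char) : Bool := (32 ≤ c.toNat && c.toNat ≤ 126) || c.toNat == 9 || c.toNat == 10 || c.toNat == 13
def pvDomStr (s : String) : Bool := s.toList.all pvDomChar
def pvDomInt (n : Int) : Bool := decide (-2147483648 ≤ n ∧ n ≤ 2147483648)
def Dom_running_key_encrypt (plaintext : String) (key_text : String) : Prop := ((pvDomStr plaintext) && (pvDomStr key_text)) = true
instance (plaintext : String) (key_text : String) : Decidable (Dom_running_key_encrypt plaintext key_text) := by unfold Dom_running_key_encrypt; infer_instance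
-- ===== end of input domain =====

-- B separates extract/validate, encrypt (zip with key), and merge into three passes instead of A's single interleaved indexed loop; same cost, different decomposition.
-- Pre_ excludes exactly the inputs on which A raises ValueError (key without letters, or more alphabetic plaintext than key letters); B raises ValueError there too.


-- ===== PORT A =====
-- _clean_key: uppercase the key text and keep the alphabetic characters (the empty-result ValueError is excluded by Pre_)
def cleanKey (key_text : String) : List Char :=
  (PySem.Chars.upper key_text.toList).filter PySem.Chars.isalpha

-- the body of A's single loop: append the shifted (or unchanged) character, advance the key index on letters
-- (the i ≥ len(key) ValueError is excluded by Pre_; getD's default is never read there)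
def stepA (key : List Char) (st : List Char × Nat) (ch : Char) : List Char × Nat :=
  if PySem.Chars.isalpha ch then
    let base := if PySem.Chars.isupper ch then 65 else 97
    let p := (PySem.Chars.upperChar ch).toNat - 65
    let k := (key.getD st.2 'A').toNat - 65
    (st.1 ++ [Char.ofNat (base + ((p + k) % 26))], st.2 + 1)
  else
    (st.1 ++ [ch], st.2)

-- A: one interleaved loop over plaintext, indexing the key with a counter
def running_key_encrypt (plaintext : String) (key_text : String) : String :=
  String.ofList (plaintext.toList.foldl (stepA (cleanKey key_text)) ([], 0)).1

-- ===== PORT B =====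
-- _shift helper of Source B
def shiftChar (ch k : Char) : Char :=
  let base := if PySem.Chars.isupper ch then 65 else 97
  Char.ofNat (base + (((PySem.Chars.upperChar ch).toNat - 65 + (k.toNat - 65)) % 26))

-- merge pass of Source B: walk plaintext again, consuming the iterator over the encrypted letters
-- (under Pre_ the iterator is never exhausted, so the [] branch is unreachable there)
def mergeEnc : List Char → List Char → List Char
  | [], _ => []
  | ch :: ps, enc =>
      if PySem.Chars.isalpha ch then
        match enc with
        | e :: es => e :: mergeEnc ps es
        | [] => ch :: mergeEnc ps []
      else ch :: mergeEnc ps enc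

-- B: extract the letters, encrypt them by zipping with the key, then merge back
def running_key_encrypt_alt (plaintext : String) (key_text : String) : String :=
  String.ofList (mergeEnc plaintext.toList
    (((plaintext.toList.filter PySem.Chars.isalpha).zip (cleanKey key_text)).map
      (fun p => shiftChar p.1 p.2)))

-- ===== PRECONDITION & SPEC =====
-- Pre_ excludes exactly the inputs on which A raises ValueError: a key_text with no alphabetic
-- characters, or a plaintext whose alphabetic characters outnumber the cleaned key's letters.
def Pre_running_key_encrypt (plaintext : String) (key_text : String) : Prop :=
  cleanKey key_text ≠ [] ∧
  plaintext.toList.countP PySem.Chars.isalpha ≤ (cleanKey key_text).length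
instance (plaintext : String) (key_text : String) : Decidable (Pre_running_key_encrypt plaintext key_text) := by unfold Pre_running_key_encrypt; infer_instance

def pvWitness_running_key_encrypt : String × String := ("Hi, there!", "SECRETKEYS")

def Spec_running_key_encrypt (plaintext : String) (key_text : String) (out : String) : Prop := out = running_key_encrypt_alt plaintext key_text
instance (plaintext : String) (key_text : String) (out : String) : Decidable (Spec_running_key_encrypt plaintext key_text out) := by unfold Spec_running_key_encrypt; infer_instance

-- ===== CLAIM (what is proved, stated in full; the proofs are below) =====
def Claim_equal_running_key_encrypt : Prop := ∀ (plaintext : String) (key_text : String), Dom_running_key_encrypt plaintext key_text → Pre_running_key_encrypt plaintext key_text → Spec_running_key_encrypt plaintext key_text (running_key_encrypt plaintext key_text)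

-- ===== LEMMAS AND PROOFS =====

-- recursive form of the letters A's loop emits, for a fixed key and starting index
def auxA (key : List Char) : List Char → Nat → List Char
  | [], _ => []
  | ch :: ps, i =>
      if PySem.Chars.isalpha ch then
        shiftChar ch (key.getD i 'A') :: auxA key ps (i + 1)
      else ch :: auxA key ps i

theorem foldA_eq_auxA (key : List Char) (ps : List Char) (acc : List Char) (i : Nat) :
    ps.foldl (stepA key) (acc, i)
      = (acc ++ auxA key ps i, i + ps.countP PySem.Chars.isalpha) := by
  induction ps generalizing acc i with
  | nil => simp [auxA]
  | cons ch ps ih =>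
      by_cases h : PySem.Chars.isalpha ch
      · simp [stepA, auxA, shiftChar, h, ih]; omega
      · simp [stepA, auxA, h, ih]

theorem auxA_eq_mergeEnc (key : List Char) (ps : List Char) (i : Nat)
    (h : i + ps.countP PySem.Chars.isalpha ≤ key.length) :
    auxA key ps i
      = mergeEnc ps (((ps.filter PySem.Chars.isalpha).zip (key.drop i)).map
          (fun p => shiftChar p.1 p.2)) := by
  induction ps generalizing i with
  | nil => simp [auxA, mergeEnc]
  | cons ch ps ih =>
      by_cases hch : PySem.Chars.isalpha ch
      · have hc : i + (ps.countP PySem.Chars.isalpha + 1) ≤ key.length := by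
          simpa [List.countP_cons, hch] using h
        have hi : i < key.length := by omega
        have hdrop : key.drop i = key[i] :: key.drop (i + 1) :=
          List.drop_eq_getElem_cons hi
        rw [List.filter_cons_of_pos hch, hdrop, List.zip_cons_cons, List.map_cons]
        simp only [auxA, mergeEnc, hch, if_true]
        rw [List.getD_eq_getElem _ _ hi, ih (i + 1) (by omega)]
      · have hc : i + ps.countP PySem.Chars.isalpha ≤ key.length := by
          simpa [List.countP_cons, hch] using h
        simp [auxA, mergeEnc, hch, List.filter_cons_of_neg hch, ih i hc]

-- ===== VERDICT (by name: the statement is the Claim_ definition above) =====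
theorem running_key_encrypt_spec : Claim_equal_running_key_encrypt := by
  intro plaintext key_text _ hpre
  unfold Spec_running_key_encrypt running_key_encrypt running_key_encrypt_alt
  rw [foldA_eq_auxA]
  have h := auxA_eq_mergeEnc (cleanKey key_text) plaintext.toList 0 (by simpa using hpre.2)
  simp only [List.drop_zero] at h
  simp [h]
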